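-- pv_equiv track=rewrite | github.com/AkhilVinod-ai/Topology_Simulation | topology.py | leaves_per_branch
-- ===== SOURCE A (Python) =====
-- from typing import Dict, Iterable, List, Set, Tuple
--
-- NodeId = str
--
-- Adjacency = Dict[NodeId, Set[NodeId]]
--
-- def leaves_per_branch(adj: Adjacency, victim: NodeId) -> Dict[int, List[NodeId]]:
--     """Return leaves grouped by branch index under victim's immediate neighbors."""
--     neighbors = sorted(adj[victim])
--     branch_map: Dict[int, List[NodeId]] = {}
--
--     for idx, start in enumerate(neighbors):
--         leaves: List[NodeId] = []
--         stack: list[tuple[NodeId, NodeId]] = [(start, victim)]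
--         while stack:
--             node, parent = stack.pop()
--             children = [n for n in adj[node] if n != parent]
--             if not children:
--                 leaves.append(node)
--             else:
--                 for c in children:
--                     stack.append((c, node))
--         branch_map[idx] = sorted(set(leaves))
--
--     return branch_map
-- ===== SOURCE B (Python) =====
-- def leaves_per_branch(adj, victim):
--     """Return leaves grouped by branch index under victim's immediate neighbors."""
--     def collect(node, parent):
--         children = [n for n in adj[node] if n != parent]
--         if not children:
--             return [node]
--         return [leaf for c in children for leaf in collect(c, node)]
--     return {idx: sorted(set(collect(start, victim)))
--             for idx, start in enumerate(sorted(adj[victim]))}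
-- ===== Notes on version B (the rewrite author's own statement) =====
-- stated objective: simpler
-- what changed: The explicit stack/while loop with a mutated leaves accumulator is replaced by a pure recursive helper that returns each subtree's leaf list, and the dict built by indexed insertion becomes a single dict comprehension; Pre_ excludes exactly the inputs where A raises KeyError (a visited node missing from adj) or never terminates (a revisitable walk state, i.e. a reachable cycle).
import Mathlib
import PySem

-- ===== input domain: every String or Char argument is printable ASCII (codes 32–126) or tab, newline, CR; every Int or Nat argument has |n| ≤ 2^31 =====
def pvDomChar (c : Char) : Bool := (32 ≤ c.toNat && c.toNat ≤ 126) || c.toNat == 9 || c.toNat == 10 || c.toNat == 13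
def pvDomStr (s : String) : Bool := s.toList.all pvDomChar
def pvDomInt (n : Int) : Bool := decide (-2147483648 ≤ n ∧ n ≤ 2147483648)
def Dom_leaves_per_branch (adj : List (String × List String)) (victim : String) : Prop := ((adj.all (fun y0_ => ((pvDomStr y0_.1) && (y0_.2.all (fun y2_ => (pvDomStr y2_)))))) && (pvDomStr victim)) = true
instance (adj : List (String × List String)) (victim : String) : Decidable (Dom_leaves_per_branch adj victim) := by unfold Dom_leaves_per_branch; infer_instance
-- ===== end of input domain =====

-- B replaces A's explicit stack and mutated accumulator by a pure recursion returning each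
-- subtree's leaf list (objective: simpler). The unbounded while loop / recursion is ported with a
-- fuel parameter large enough for every input Pre_ admits (a totality guard, not an algorithm change).

-- total number of listed neighbor entries (fuel / closure bound helper)
def pvE (adj : List (String × List String)) : Nat := (adj.map (fun kv => kv.2.length)).sum

-- ===== PORT A =====
-- the while-loop: stack of (node, parent) with the list HEAD as the stack top (Python pushes/pops
-- at the end); children pushed in order c1..ck leave ck on top, hence `.reverse` here.
def pvLoopA (d : PySem.Dict String (List String)) : Nat → List (String × String) → List String → List String
  | _, [], leaves => leaves
  | 0, _ :: _, leaves => leaves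
  | fuel+1, (node, parent) :: rest, leaves =>
      let children := (PySem.Set.ofList (d.getD node [])).filter (fun n => n ≠ parent)
      if children.isEmpty then
        pvLoopA d fuel rest (leaves ++ [node])
      else
        pvLoopA d fuel ((children.map (fun c => (c, node))).reverse ++ rest) leaves

def leaves_per_branch (adj : List (String × List String)) (victim : String) : List (Int × List String) :=
  let d := PySem.Dict.ofList adj
  let neighbors := PySem.List.sorted (PySem.Set.ofList (d.getD victim [])) (fun x => x) false
  let fuel := (pvE adj + 2) ^ (pvE adj + 2)
  ((PySem.List.enumerate neighbors 0).foldl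
    (fun bm p =>
      bm.insert p.1
        (PySem.List.sorted (PySem.Set.ofList (pvLoopA d fuel [(p.2, victim)] [])) (fun x => x) false))
    PySem.Dict.empty).items

-- ===== PORT B =====
-- the recursive helper `collect(node, parent)` returning the subtree's leaf list
def pvCollect (d : PySem.Dict String (List String)) : Nat → String → String → List String
  | 0, _, _ => []
  | fuel+1, node, parent =>
      let children := (PySem.Set.ofList (d.getD node [])).filter (fun n => n ≠ parent)
      if children.isEmpty then [node]
      else children.flatMap (fun c => pvCollect d fuel c node)

def leaves_per_branch_alt (adj : List (String × List String)) (victim : String) : List (Int × List String) :=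
  let d := PySem.Dict.ofList adj
  (PySem.List.enumerate (PySem.List.sorted (PySem.Set.ofList (d.getD victim [])) (fun x => x) false) 0).map
    (fun p => (p.1, PySem.List.sorted (PySem.Set.ofList (pvCollect d (pvE adj + 2) p.2 victim)) (fun x => x) false))

-- ===== PRECONDITION & SPEC =====
-- walk states are pairs (node, parent); successors step to every neighbor of node except parent
def pvSuccs (d : PySem.Dict String (List String)) (s : String × String) : List (String × String) :=
  ((PySem.Set.ofList (d.getD s.1 [])).filter (fun n => n ≠ s.2)).map (fun c => (c, s.1))

def pvStep (d : PySem.Dict String (List String)) (l : List (String × String)) : List (String × String) :=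
  PySem.Set.update l (l.flatMap (pvSuccs d))

def pvClos (d : PySem.Dict String (List String)) : Nat → List (String × String) → List (String × String)
  | 0, l => l
  | k+1, l => pvStep d (pvClos d k l)

def pvInit (adj : List (String × List String)) (victim : String) : List (String × String) :=
  (PySem.Set.ofList ((PySem.Dict.ofList adj).getD victim [])).map (fun c => (c, victim))

def pvBound (adj : List (String × List String)) : Nat := 2 * pvE adj + 2

-- Pre_ states exactly the graph-shape condition under which the Python A returns: victim is a key,
-- every node the walk can visit is a key (otherwise adj[node] raises KeyError), and no visitable
-- walk state lies on a cycle of the step relation pvSuccs (otherwise the while loop never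
-- terminates). The visitable set is the least pvSuccs-closed superset of the start states; pvClos
-- names it as the monotone fixpoint of one ∪-step, saturated after pvBound rounds — a shape
-- condition on the neighbor relation, not a run of either port (neither collects leaves,
-- stacks, or branch indices).
def Pre_leaves_per_branch (adj : List (String × List String)) (victim : String) : Prop :=
  (PySem.Dict.ofList adj).contains victim = true ∧
  ∀ s ∈ pvClos (PySem.Dict.ofList adj) (pvBound adj) (pvInit adj victim),
    (PySem.Dict.ofList adj).contains s.1 = true ∧
    s ∉ pvClos (PySem.Dict.ofList adj) (pvBound adj) (pvSuccs (PySem.Dict.ofList adj) s)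

instance (adj : List (String × List String)) (victim : String) : Decidable (Pre_leaves_per_branch adj victim) := by
  unfold Pre_leaves_per_branch; infer_instance

def pvWitness_leaves_per_branch : (List (String × List String)) × String :=
  ([("v", ["a", "b"]), ("a", ["v", "c"]), ("b", ["v"]), ("c", ["a"])], "v")

def Spec_leaves_per_branch (adj : List (String × List String)) (victim : String) (out : List (Int × List String)) : Prop := out = leaves_per_branch_alt adj victim
instance (adj : List (String × List String)) (victim : String) (out : List (Int × List String)) : Decidable (Spec_leaves_per_branch adj victim out) := by unfold Spec_leaves_per_branch; infer_instance

-- ===== CLAIM (what is proved, stated in full; the proofs are below) =====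
def Claim_equal_leaves_per_branch : Prop := ∀ (adj : List (String × List String)) (victim : String), Dom_leaves_per_branch adj victim → Pre_leaves_per_branch adj victim → Spec_leaves_per_branch adj victim (leaves_per_branch adj victim)

-- ===== LEMMAS AND PROOFS =====


-- ---- proof-side shorthands ----
def pvUniv (adj : List (String × List String)) : List (String × String) :=
  adj.flatMap (fun kv => kv.2.map (fun c => (c, kv.1)))

def pvG (adj : List (String × List String)) (victim : String) : List (String × String) :=
  pvClos (PySem.Dict.ofList adj) (pvBound adj) (pvInit adj victim)

def pvA (adj : List (String × List String)) (s : String × String) : List (String × String) :=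
  pvClos (PySem.Dict.ofList adj) (pvBound adj) (pvSuccs (PySem.Dict.ofList adj) s)

def pvRank (adj : List (String × List String)) (s : String × String) : Nat := (pvA adj s).length

def pvNeed (d : PySem.Dict String (List String)) : Nat → (String × String) → Nat
  | 0, _ => 1
  | f+1, s => 1 + ((pvSuccs d s).map (pvNeed d f)).sum

def pvNeedF (adj : List (String × List String)) (s : String × String) : Nat :=
  pvNeed (PySem.Dict.ofList adj) (pvE adj + 2) s

-- ---- closure basics ----
theorem pv_mem_pvStep (d : PySem.Dict String (List String)) (l : List (String × String)) (x : String × String) :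
    x ∈ pvStep d l ↔ x ∈ l ∨ ∃ s ∈ l, x ∈ pvSuccs d s := by
  simp [pvStep, PySem.Set.mem_update, List.mem_flatMap]

theorem pv_nodup_pvStep (d : PySem.Dict String (List String)) (l : List (String × String)) (h : l.Nodup) :
    (pvStep d l).Nodup := PySem.Set.nodup_update _ _ h

theorem pv_nodup_pvClos (d : PySem.Dict String (List String)) (k : Nat) (l : List (String × String)) (h : l.Nodup) :
    (pvClos d k l).Nodup := by
  induction k with
  | zero => exact h
  | succ k ih => exact pv_nodup_pvStep _ _ ih

theorem pv_mem_pvClos_of_mem (d : PySem.Dict String (List String)) (k : Nat) (l : List (String × String))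
    (x : String × String) (h : x ∈ l) : x ∈ pvClos d k l := by
  induction k with
  | zero => exact h
  | succ k ih => exact (pv_mem_pvStep _ _ _).2 (Or.inl ih)

theorem pv_pvClos_add (d : PySem.Dict String (List String)) (a b : Nat) (l : List (String × String)) :
    pvClos d (a + b) l = pvClos d a (pvClos d b l) := by
  induction a with
  | zero => simp [pvClos]
  | succ a ih =>
      have h1 : a + 1 + b = (a + b) + 1 := by omega
      rw [h1]
      show pvStep d (pvClos d (a + b) l) = _
      rw [ih]; rfl

theorem pv_fix (d : PySem.Dict String (List String)) (m : List (String × String)) (h : pvStep d m = m) :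
    ∀ i, pvClos d i m = m := by
  intro i; induction i with
  | zero => rfl
  | succ i ih => show pvStep d (pvClos d i m) = m; rw [ih, h]

theorem pv_pvClos_min (d : PySem.Dict String (List String)) (P : String × String → Prop)
    (hP : ∀ s, P s → ∀ t ∈ pvSuccs d s, P t) :
    ∀ (k : Nat) (l : List (String × String)), (∀ x ∈ l, P x) → ∀ x ∈ pvClos d k l, P x := by
  intro k
  induction k with
  | zero => intro l hl x hx; exact hl x hx
  | succ k ih =>
      intro l hl x hx
      rcases (pv_mem_pvStep _ _ _).1 hx with h | ⟨s, hs, hxs⟩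
      · exact ih l hl x h
      · exact hP s (ih l hl s hs) x hxs

-- ---- universe ----
theorem pv_length_univ (adj : List (String × List String)) : (pvUniv adj).length = pvE adj := by
  simp [pvUniv, pvE]

theorem pv_ofList_foldl_get? (pairs : List (String × List String)) (d0 : PySem.Dict String (List String))
    (k : String) (v : List String)
    (h : (pairs.foldl (fun d p => d.insert p.1 p.2) d0).get? k = some v) :
    (k, v) ∈ pairs ∨ d0.get? k = some v := by
  induction pairs generalizing d0 with
  | nil => exact Or.inr h
  | cons p ps ih =>
      rcases ih (d0.insert p.1 p.2) h with hm | hd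
      · exact Or.inl (List.mem_cons_of_mem _ hm)
      · rw [PySem.Dict.get?_insert] at hd
        by_cases hk : k = p.1
        · subst hk
          simp at hd
          exact Or.inl (by rw [← hd]; exact List.mem_cons_self)
        · rw [if_neg hk] at hd; exact Or.inr hd

theorem pv_get?_ofList_mem (adj : List (String × List String)) (k : String) (v : List String)
    (h : (PySem.Dict.ofList adj).get? k = some v) : (k, v) ∈ adj := by
  have := pv_ofList_foldl_get? adj PySem.Dict.empty k v (by exact h)
  rcases this with hm | hd
  · exact hm
  · rw [PySem.Dict.get?_empty] at hd; cases hd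

theorem pv_getD_cases (adj : List (String × List String)) (k : String) :
    (PySem.Dict.ofList adj).getD k [] = [] ∨ (k, (PySem.Dict.ofList adj).getD k []) ∈ adj := by
  cases hg : (PySem.Dict.ofList adj).get? k with
  | none => exact Or.inl (PySem.Dict.getD_of_get?_eq_none _ _ hg)
  | some v =>
      right
      rw [PySem.Dict.getD_of_get?_eq_some _ _ hg]
      exact pv_get?_ofList_mem adj k v hg

theorem pv_val_len_le (adj : List (String × List String)) (k : String) (v : List String)
    (h : (k, v) ∈ adj) : v.length ≤ pvE adj := by
  have : v.length ∈ adj.map (fun kv => kv.2.length) := List.mem_map.2 ⟨(k, v), h, rfl⟩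
  exact List.single_le_sum (fun _ _ => Nat.zero_le _) _ this

theorem pv_getD_len_le (adj : List (String × List String)) (k : String) :
    ((PySem.Dict.ofList adj).getD k []).length ≤ pvE adj := by
  rcases pv_getD_cases adj k with h | h
  · rw [h]; exact Nat.zero_le _
  · exact pv_val_len_le adj k _ h

theorem pv_succs_sub_univ (adj : List (String × List String)) (s x : String × String)
    (h : x ∈ pvSuccs (PySem.Dict.ofList adj) s) : x ∈ pvUniv adj := by
  rcases List.mem_map.1 h with ⟨c, hc, rfl⟩
  have hcv : c ∈ (PySem.Dict.ofList adj).getD s.1 [] :=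
    (PySem.Set.mem_ofList _ _).1 (List.mem_of_mem_filter hc)
  rcases pv_getD_cases adj s.1 with hnil | hmem
  · rw [hnil] at hcv; cases hcv
  · exact List.mem_flatMap.2 ⟨(s.1, _), hmem, List.mem_map.2 ⟨c, hcv, rfl⟩⟩

theorem pv_clos_sub (adj : List (String × List String)) (k : Nat) (l : List (String × String))
    (x : String × String) (h : x ∈ pvClos (PySem.Dict.ofList adj) k l) : x ∈ l ∨ x ∈ pvUniv adj := by
  refine pv_pvClos_min _ (fun y => y ∈ l ∨ y ∈ pvUniv adj) ?_ k l (fun y hy => Or.inl hy) x h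
  intro s _ t ht
  exact Or.inr (pv_succs_sub_univ adj s t ht)

-- ---- counting / saturation ----
theorem pv_nodup_length_le (m w : List (String × String)) (hm : m.Nodup)
    (hsub : ∀ x ∈ m, x ∈ w) : m.length ≤ w.length := by
  calc m.length = m.toFinset.card := (List.toFinset_card_of_nodup hm).symm
    _ ≤ w.toFinset.card := Finset.card_le_card (fun x hx => List.mem_toFinset.2 (hsub x (List.mem_toFinset.1 hx)))
    _ ≤ w.length := List.toFinset_card_le w

theorem pv_nodup_length_lt (m w : List (String × String)) (hm : m.Nodup) (hw : w.Nodup)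
    (hsub : ∀ x ∈ m, x ∈ w) (y : String × String) (hyw : y ∈ w) (hym : y ∉ m) :
    m.length < w.length := by
  calc m.length = m.toFinset.card := (List.toFinset_card_of_nodup hm).symm
    _ < w.toFinset.card := by
        apply Finset.card_lt_card
        constructor
        · intro x hx; exact List.mem_toFinset.2 (hsub x (List.mem_toFinset.1 hx))
        · intro hcon
          exact hym (List.mem_toFinset.1 (hcon (List.mem_toFinset.2 hyw)))
    _ = w.length := List.toFinset_card_of_nodup hw

theorem pv_pvStep_append (d : PySem.Dict String (List String)) (l : List (String × String)) :
    ∃ t, pvStep d l = l ++ t := ⟨_, PySem.Set.update_eq_append_filter ..⟩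

theorem pv_closed (adj : List (String × List String)) (l : List (String × String)) (hl : l.Nodup)
    (k : Nat) (hk : l.length + pvE adj < k) :
    pvStep (PySem.Dict.ofList adj) (pvClos (PySem.Dict.ofList adj) k l)
      = pvClos (PySem.Dict.ofList adj) k l := by
  set d := PySem.Dict.ofList adj with hd
  set M := l.length + pvE adj with hM
  have hex : ∃ j, j ≤ M ∧ pvStep d (pvClos d j l) = pvClos d j l := by
    by_contra hcon
    push Not at hcon
    have grow : ∀ j, j ≤ M + 1 → l.length + j ≤ (pvClos d j l).length := by
      intro j
      induction j with
      | zero => intro _; simp [pvClos]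
      | succ j ih =>
          intro hj
          have hfix := hcon j (by omega)
          obtain ⟨t, ht⟩ := pv_pvStep_append d (pvClos d j l)
          have htne : t ≠ [] := by
            intro h0; rw [h0, List.append_nil] at ht; exact hfix ht
          have : (pvClos d (j+1) l).length = (pvClos d j l).length + t.length := by
            show (pvStep d (pvClos d j l)).length = _
            rw [ht, List.length_append]
          have h1 : 1 ≤ t.length := List.length_pos_iff.2 htne
          have h2 := ih (by omega)
          omega
    have hb : (pvClos d (M+1) l).length ≤ l.length + pvE adj := by
      have := pv_nodup_length_le (pvClos d (M+1) l) (l ++ pvUniv adj)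
        (pv_nodup_pvClos d _ l hl)
        (fun x hx => List.mem_append.2 (by
          rcases pv_clos_sub adj (M+1) l x (by rw [← hd]; exact hx) with h | h
          · exact Or.inl h
          · exact Or.inr h))
      rw [List.length_append, pv_length_univ] at this
      exact this
    have := grow (M+1) (le_refl _)
    omega
  obtain ⟨j, hj, hfix⟩ := hex
  have heq : pvClos d k l = pvClos d j l := by
    have hk2 : k = (k - j) + j := by omega
    rw [hk2, pv_pvClos_add, pv_fix d _ hfix]
  rw [heq, hfix]


-- ---- unfolding equations for the fueled ports ----
theorem pv_loopA_cons (d : PySem.Dict String (List String)) (f : Nat) (node parent : String)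
    (rest : List (String × String)) (leaves : List String) :
    pvLoopA d (f+1) ((node,parent)::rest) leaves =
      if ((PySem.Set.ofList (d.getD node [])).filter (fun n => n ≠ parent)).isEmpty
      then pvLoopA d f rest (leaves ++ [node])
      else pvLoopA d f (((((PySem.Set.ofList (d.getD node [])).filter (fun n => n ≠ parent)).map (fun c => (c, node))).reverse) ++ rest) leaves := rfl

theorem pv_collect_succ (d : PySem.Dict String (List String)) (f : Nat) (node parent : String) :
    pvCollect d (f+1) node parent =
      if ((PySem.Set.ofList (d.getD node [])).filter (fun n => n ≠ parent)).isEmpty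
      then [node]
      else ((PySem.Set.ofList (d.getD node [])).filter (fun n => n ≠ parent)).flatMap (fun c => pvCollect d f c node) := rfl

theorem pv_succs_eq (d : PySem.Dict String (List String)) (node parent : String) :
    pvSuccs d (node, parent) = ((PySem.Set.ofList (d.getD node [])).filter (fun n => n ≠ parent)).map (fun c => (c, node)) := rfl

-- ---- shapes of init/succs ----
theorem pv_init_nodup (adj : List (String × List String)) (victim : String) : (pvInit adj victim).Nodup := by
  apply List.Nodup.map
  · intro a b h; exact congrArg Prod.fst h
  · exact PySem.Set.nodup_ofList _

theorem pv_init_len (adj : List (String × List String)) (victim : String) :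
    (pvInit adj victim).length ≤ pvE adj := by
  unfold pvInit
  rw [List.length_map]
  exact le_trans (PySem.Set.length_ofList_le _) (pv_getD_len_le adj victim)

theorem pv_succs_nodup (d : PySem.Dict String (List String)) (s : String × String) : (pvSuccs d s).Nodup := by
  apply List.Nodup.map
  · intro a b h; exact congrArg Prod.fst h
  · exact (PySem.Set.nodup_ofList _).filter _

theorem pv_succs_len (adj : List (String × List String)) (s : String × String) :
    (pvSuccs (PySem.Dict.ofList adj) s).length ≤ pvE adj := by
  unfold pvSuccs
  rw [List.length_map]
  exact le_trans (List.length_filter_le _ _)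
    (le_trans (PySem.Set.length_ofList_le _) (pv_getD_len_le adj s.1))

-- ---- closedness of pvG and pvA, rank ----
theorem pv_G_closed (adj : List (String × List String)) (victim : String) :
    ∀ s ∈ pvG adj victim, ∀ t ∈ pvSuccs (PySem.Dict.ofList adj) s, t ∈ pvG adj victim := by
  have hstep := pv_closed adj (pvInit adj victim) (pv_init_nodup adj victim) (pvBound adj)
    (by have := pv_init_len adj victim; unfold pvBound; omega)
  intro s hs t ht
  have : t ∈ pvStep (PySem.Dict.ofList adj) (pvG adj victim) :=
    (pv_mem_pvStep _ _ _).2 (Or.inr ⟨s, hs, ht⟩)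
  rwa [show pvStep (PySem.Dict.ofList adj) (pvG adj victim) = pvG adj victim from hstep] at this

theorem pv_A_closed (adj : List (String × List String)) (s : String × String) :
    ∀ y ∈ pvA adj s, ∀ z ∈ pvSuccs (PySem.Dict.ofList adj) y, z ∈ pvA adj s := by
  have hstep := pv_closed adj (pvSuccs (PySem.Dict.ofList adj) s) (pv_succs_nodup _ s) (pvBound adj)
    (by have := pv_succs_len adj s; unfold pvBound; omega)
  intro y hy z hz
  have : z ∈ pvStep (PySem.Dict.ofList adj) (pvA adj s) :=
    (pv_mem_pvStep _ _ _).2 (Or.inr ⟨y, hy, hz⟩)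
  rwa [show pvStep (PySem.Dict.ofList adj) (pvA adj s) = pvA adj s from hstep] at this

theorem pv_At_sub_As (adj : List (String × List String)) (s t : String × String)
    (ht : t ∈ pvSuccs (PySem.Dict.ofList adj) s) : ∀ x ∈ pvA adj t, x ∈ pvA adj s := by
  refine pv_pvClos_min _ (fun x => x ∈ pvA adj s) ?_ _ _ ?_
  · intro y hy z hz; exact pv_A_closed adj s y hy z hz
  · intro x hx
    have hts : t ∈ pvA adj s := pv_mem_pvClos_of_mem _ _ _ _ ht
    exact pv_A_closed adj s t hts x hx

theorem pv_nodup_A (adj : List (String × List String)) (s : String × String) : (pvA adj s).Nodup :=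
  pv_nodup_pvClos _ _ _ (pv_succs_nodup _ s)

theorem pv_rank_lt (adj : List (String × List String)) (victim : String)
    (hacyc : ∀ s ∈ pvG adj victim, s ∉ pvA adj s) (s t : String × String)
    (hs : s ∈ pvG adj victim) (ht : t ∈ pvSuccs (PySem.Dict.ofList adj) s) :
    pvRank adj t < pvRank adj s := by
  have htG : t ∈ pvG adj victim := pv_G_closed adj victim s hs t ht
  exact pv_nodup_length_lt (pvA adj t) (pvA adj s) (pv_nodup_A adj t) (pv_nodup_A adj s)
    (pv_At_sub_As adj s t ht) t (pv_mem_pvClos_of_mem _ _ _ _ ht) (hacyc t htG)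

theorem pv_rank_le (adj : List (String × List String)) (s : String × String) :
    pvRank adj s ≤ pvE adj := by
  have h := pv_nodup_length_le (pvA adj s) (pvUniv adj) (pv_nodup_A adj s) ?_
  · rwa [pv_length_univ] at h
  · intro x hx
    rcases pv_clos_sub adj _ _ x hx with h | h
    · exact pv_succs_sub_univ adj s x h
    · exact h

-- ---- stabilization of the fueled recursions ----
theorem pv_collect_stab (adj : List (String × List String)) (victim : String)
    (hacyc : ∀ s ∈ pvG adj victim, s ∉ pvA adj s) :
    ∀ (r : Nat) (s : String × String), s ∈ pvG adj victim → pvRank adj s < r →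
    ∀ f g, pvRank adj s + 1 ≤ f → pvRank adj s + 1 ≤ g →
    pvCollect (PySem.Dict.ofList adj) f s.1 s.2 = pvCollect (PySem.Dict.ofList adj) g s.1 s.2 := by
  intro r
  induction r with
  | zero => intro s _ h; omega
  | succ r ih =>
      intro s hs hr f g hf hg
      obtain ⟨f, rfl⟩ : ∃ f', f = f' + 1 := ⟨f - 1, by omega⟩
      obtain ⟨g, rfl⟩ : ∃ g', g = g' + 1 := ⟨g - 1, by omega⟩
      rw [pv_collect_succ, pv_collect_succ]
      by_cases hemp : ((PySem.Set.ofList ((PySem.Dict.ofList adj).getD s.1 [])).filter (fun n => n ≠ s.2)).isEmpty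
      · rw [if_pos hemp, if_pos hemp]
      · rw [if_neg hemp, if_neg hemp]
        rw [List.flatMap_def, List.flatMap_def]
        apply congrArg List.flatten
        apply List.map_congr_left
        intro c hc
        have hts : (c, s.1) ∈ pvSuccs (PySem.Dict.ofList adj) s := by
          rw [show s = (s.1, s.2) from rfl] at hc ⊢
          rw [pv_succs_eq]
          exact List.mem_map.2 ⟨c, hc, rfl⟩
        have hlt := pv_rank_lt adj victim hacyc s _ hs hts
        exact ih (c, s.1) (pv_G_closed adj victim s hs _ hts) (by omega) f g (by omega) (by omega)

theorem pv_need_stab (adj : List (String × List String)) (victim : String)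
    (hacyc : ∀ s ∈ pvG adj victim, s ∉ pvA adj s) :
    ∀ (r : Nat) (s : String × String), s ∈ pvG adj victim → pvRank adj s < r →
    ∀ f g, pvRank adj s + 1 ≤ f → pvRank adj s + 1 ≤ g →
    pvNeed (PySem.Dict.ofList adj) f s = pvNeed (PySem.Dict.ofList adj) g s := by
  intro r
  induction r with
  | zero => intro s _ h; omega
  | succ r ih =>
      intro s hs hr f g hf hg
      obtain ⟨f, rfl⟩ : ∃ f', f = f' + 1 := ⟨f - 1, by omega⟩
      obtain ⟨g, rfl⟩ : ∃ g', g = g' + 1 := ⟨g - 1, by omega⟩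
      show 1 + _ = 1 + _
      apply congrArg (1 + ·)
      apply congrArg List.sum
      apply List.map_congr_left
      intro t ht
      have hlt := pv_rank_lt adj victim hacyc s t hs ht
      exact ih t (pv_G_closed adj victim s hs t ht) (by omega) f g (by omega) (by omega)

theorem pv_need_pos (adj : List (String × List String)) (s : String × String) :
    1 ≤ pvNeedF adj s := by
  show 1 ≤ pvNeed _ (pvE adj + 2) s
  have h : pvE adj + 2 = (pvE adj + 1) + 1 := rfl
  rw [h]
  show 1 ≤ 1 + _
  omega

theorem pv_need_unfold (adj : List (String × List String)) (victim : String)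
    (hacyc : ∀ s ∈ pvG adj victim, s ∉ pvA adj s) (s : String × String) (hs : s ∈ pvG adj victim) :
    pvNeedF adj s = 1 + ((pvSuccs (PySem.Dict.ofList adj) s).map (pvNeedF adj)).sum := by
  show pvNeed _ (pvE adj + 2) s = _
  rw [show pvE adj + 2 = (pvE adj + 1) + 1 from rfl]
  show 1 + _ = 1 + _
  apply congrArg (1 + ·)
  apply congrArg List.sum
  apply List.map_congr_left
  intro t ht
  have hlt := pv_rank_lt adj victim hacyc s t hs ht
  have hle := pv_rank_le adj s
  exact pv_need_stab adj victim hacyc (pvRank adj t + 1) t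
    (pv_G_closed adj victim s hs t ht) (by omega) _ _ (by omega) (by omega)

theorem pv_collect_unfoldF (adj : List (String × List String)) (victim : String)
    (hacyc : ∀ s ∈ pvG adj victim, s ∉ pvA adj s) (node parent : String)
    (hs : (node, parent) ∈ pvG adj victim) :
    pvCollect (PySem.Dict.ofList adj) (pvE adj + 2) node parent =
      if ((PySem.Set.ofList ((PySem.Dict.ofList adj).getD node [])).filter (fun n => n ≠ parent)).isEmpty
      then [node]
      else ((PySem.Set.ofList ((PySem.Dict.ofList adj).getD node [])).filter (fun n => n ≠ parent)).flatMap
        (fun c => pvCollect (PySem.Dict.ofList adj) (pvE adj + 2) c node) := by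
  rw [show pvE adj + 2 = (pvE adj + 1) + 1 from rfl, pv_collect_succ]
  by_cases hemp : ((PySem.Set.ofList ((PySem.Dict.ofList adj).getD node [])).filter (fun n => n ≠ parent)).isEmpty
  · rw [if_pos hemp, if_pos hemp]
  · rw [if_neg hemp, if_neg hemp]
    rw [List.flatMap_def, List.flatMap_def]
    apply congrArg List.flatten
    apply List.map_congr_left
    intro c hc
    have hts : (c, node) ∈ pvSuccs (PySem.Dict.ofList adj) (node, parent) := by
      rw [pv_succs_eq]; exact List.mem_map.2 ⟨c, hc, rfl⟩
    have hlt := pv_rank_lt adj victim hacyc (node, parent) _ hs hts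
    have hle := pv_rank_le adj (node, parent)
    exact pv_collect_stab adj victim hacyc (pvRank adj (c, node) + 1) (c, node)
      (pv_G_closed adj victim _ hs _ hts) (by omega) _ _ (by omega) (by omega)

theorem pv_need_bound (adj : List (String × List String)) (victim : String)
    (hacyc : ∀ s ∈ pvG adj victim, s ∉ pvA adj s) :
    ∀ (r : Nat) (s : String × String), s ∈ pvG adj victim → pvRank adj s < r →
    pvNeedF adj s ≤ (pvE adj + 2) ^ (pvRank adj s + 1) := by
  intro r
  induction r with
  | zero => intro s _ h; omega
  | succ r ih =>
      intro s hs hr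
      rw [pv_need_unfold adj victim hacyc s hs]
      have hb : ∀ x ∈ (pvSuccs (PySem.Dict.ofList adj) s).map (pvNeedF adj), x ≤ (pvE adj + 2) ^ (pvRank adj s) := by
        intro x hx
        rcases List.mem_map.1 hx with ⟨t, ht, rfl⟩
        have hlt := pv_rank_lt adj victim hacyc s t hs ht
        calc pvNeedF adj t ≤ (pvE adj + 2) ^ (pvRank adj t + 1) :=
              ih t (pv_G_closed adj victim s hs t ht) (by omega)
          _ ≤ (pvE adj + 2) ^ (pvRank adj s) := Nat.pow_le_pow_right (by omega) (by omega)
      have hsum := List.sum_le_card_nsmul _ _ hb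
      rw [List.length_map] at hsum
      have hlen := pv_succs_len adj s
      have h1 : 1 ≤ (pvE adj + 2) ^ (pvRank adj s) := Nat.one_le_pow _ _ (by omega)
      have hpow : (pvE adj + 2) ^ (pvRank adj s + 1) = pvE adj * (pvE adj + 2) ^ (pvRank adj s) + 2 * (pvE adj + 2) ^ (pvRank adj s) := by
        rw [pow_succ]; ring
      have hmul : (pvSuccs (PySem.Dict.ofList adj) s).length • ((pvE adj + 2) ^ (pvRank adj s)) ≤ pvE adj * (pvE adj + 2) ^ (pvRank adj s) := by
        rw [smul_eq_mul]
        exact Nat.mul_le_mul_right _ hlen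
      omega


-- ---- the main loop lemma: A's stack loop computes (memberwise) B's recursive leaves ----
theorem pv_loopA_mem (adj : List (String × List String)) (victim : String)
    (hacyc : ∀ s ∈ pvG adj victim, s ∉ pvA adj s) :
    ∀ (W : Nat) (stack : List (String × String)) (acc : List String) (fuel : Nat) (x : String),
    (∀ s ∈ stack, s ∈ pvG adj victim) →
    (stack.map (pvNeedF adj)).sum ≤ W →
    (stack.map (pvNeedF adj)).sum ≤ fuel →
    (x ∈ pvLoopA (PySem.Dict.ofList adj) fuel stack acc ↔
      x ∈ acc ∨ ∃ s ∈ stack, x ∈ pvCollect (PySem.Dict.ofList adj) (pvE adj + 2) s.1 s.2) := by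
  intro W
  induction W with
  | zero =>
      intro stack acc fuel x hg hW hf
      cases stack with
      | nil => cases fuel <;> simp [pvLoopA]
      | cons s rest =>
          exfalso
          have := pv_need_pos adj s
          simp only [List.map_cons, List.sum_cons] at hW
          omega
  | succ W ih =>
      intro stack acc fuel x hg hW hf
      cases stack with
      | nil => cases fuel <;> simp [pvLoopA]
      | cons s rest =>
          obtain ⟨node, parent⟩ := s
          have hpos := pv_need_pos adj (node, parent)
          simp only [List.map_cons, List.sum_cons] at hW hf
          obtain ⟨f, rfl⟩ : ∃ f', fuel = f' + 1 := ⟨fuel - 1, by omega⟩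
          have hsG : (node, parent) ∈ pvG adj victim := hg _ (List.mem_cons_self ..)
          have hrestG : ∀ t ∈ rest, t ∈ pvG adj victim := fun t htr => hg t (List.mem_cons_of_mem _ htr)
          have hcu := pv_collect_unfoldF adj victim hacyc node parent hsG
          rw [pv_loopA_cons]
          by_cases hemp : ((PySem.Set.ofList ((PySem.Dict.ofList adj).getD node [])).filter (fun n => n ≠ parent)).isEmpty
          · rw [if_pos hemp]
            rw [ih rest (acc ++ [node]) f x hrestG (by omega) (by omega)]
            have hhead : pvCollect (PySem.Dict.ofList adj) (pvE adj + 2) node parent = [node] := by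
              rw [hcu, if_pos hemp]
            constructor
            · rintro (hx | ⟨t, htr, hxt⟩)
              · rcases List.mem_append.1 hx with h | h
                · exact Or.inl h
                · refine Or.inr ⟨(node, parent), List.mem_cons_self .., ?_⟩
                  show x ∈ pvCollect (PySem.Dict.ofList adj) (pvE adj + 2) node parent
                  rw [hhead]; exact h
              · exact Or.inr ⟨t, List.mem_cons_of_mem _ htr, hxt⟩
            · rintro (hx | ⟨t, htm, hxt⟩)
              · exact Or.inl (List.mem_append.2 (Or.inl hx))
              · rcases List.mem_cons.1 htm with rfl | htr
                · left
                  apply List.mem_append.2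
                  right
                  have : x ∈ pvCollect (PySem.Dict.ofList adj) (pvE adj + 2) node parent := hxt
                  rwa [hhead] at this
                · exact Or.inr ⟨t, htr, hxt⟩
          · rw [if_neg hemp]
            have hneed := pv_need_unfold adj victim hacyc (node, parent) hsG
            have hsum' :
                (((((PySem.Set.ofList ((PySem.Dict.ofList adj).getD node [])).filter (fun n => n ≠ parent)).map (fun c => (c, node))).reverse ++ rest).map (pvNeedF adj)).sum
                  = ((pvSuccs (PySem.Dict.ofList adj) (node, parent)).map (pvNeedF adj)).sum + (rest.map (pvNeedF adj)).sum := by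
              rw [List.map_append, List.sum_append, List.map_reverse, List.sum_reverse, pv_succs_eq, List.map_map]
            have hstack' : ∀ t ∈ ((((PySem.Set.ofList ((PySem.Dict.ofList adj).getD node [])).filter (fun n => n ≠ parent)).map (fun c => (c, node))).reverse ++ rest), t ∈ pvG adj victim := by
              intro t htm
              rcases List.mem_append.1 htm with hrev | htr
              · rcases List.mem_map.1 (List.mem_reverse.1 hrev) with ⟨c, hc, rfl⟩
                exact pv_G_closed adj victim _ hsG _ (by rw [pv_succs_eq]; exact List.mem_map.2 ⟨c, hc, rfl⟩)
              · exact hrestG t htr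
            rw [ih _ acc f x hstack' (by omega) (by omega)]
            have hhead : pvCollect (PySem.Dict.ofList adj) (pvE adj + 2) node parent
                = ((PySem.Set.ofList ((PySem.Dict.ofList adj).getD node [])).filter (fun n => n ≠ parent)).flatMap
                    (fun c => pvCollect (PySem.Dict.ofList adj) (pvE adj + 2) c node) := by
              rw [hcu, if_neg hemp]
            constructor
            · rintro (hx | ⟨t, htm, hxt⟩)
              · exact Or.inl hx
              · rcases List.mem_append.1 htm with hrev | htr
                · rcases List.mem_map.1 (List.mem_reverse.1 hrev) with ⟨c, hc, rfl⟩
                  refine Or.inr ⟨(node, parent), List.mem_cons_self .., ?_⟩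
                  show x ∈ pvCollect (PySem.Dict.ofList adj) (pvE adj + 2) node parent
                  rw [hhead]
                  exact List.mem_flatMap.2 ⟨c, hc, hxt⟩
                · exact Or.inr ⟨t, List.mem_cons_of_mem _ htr, hxt⟩
            · rintro (hx | ⟨t, htm, hxt⟩)
              · exact Or.inl hx
              · rcases List.mem_cons.1 htm with rfl | htr
                · have hx2 : x ∈ pvCollect (PySem.Dict.ofList adj) (pvE adj + 2) node parent := hxt
                  rw [hhead] at hx2
                  rcases List.mem_flatMap.1 hx2 with ⟨c, hc, hxc⟩
                  exact Or.inr ⟨(c, node),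
                    List.mem_append.2 (Or.inl (List.mem_reverse.2 (List.mem_map.2 ⟨c, hc, rfl⟩))), hxc⟩
                · exact Or.inr ⟨t, List.mem_append.2 (Or.inr htr), hxt⟩

theorem pv_branch (adj : List (String × List String)) (victim : String)
    (hacyc : ∀ s ∈ pvG adj victim, s ∉ pvA adj s) (start : String)
    (hst : (start, victim) ∈ pvG adj victim) (x : String) :
    (x ∈ pvLoopA (PySem.Dict.ofList adj) ((pvE adj + 2) ^ (pvE adj + 2)) [(start, victim)] [] ↔
      x ∈ pvCollect (PySem.Dict.ofList adj) (pvE adj + 2) start victim) := by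
  have hfuel : ([(start, victim)].map (pvNeedF adj)).sum ≤ (pvE adj + 2) ^ (pvE adj + 2) := by
    simp only [List.map_cons, List.map_nil, List.sum_cons, List.sum_nil, Nat.add_zero]
    calc pvNeedF adj (start, victim)
        ≤ (pvE adj + 2) ^ (pvRank adj (start, victim) + 1) :=
          pv_need_bound adj victim hacyc (pvRank adj (start, victim) + 1) _ hst (by omega)
      _ ≤ (pvE adj + 2) ^ (pvE adj + 2) :=
          Nat.pow_le_pow_right (by omega) (by have := pv_rank_le adj (start, victim); omega)
  rw [pv_loopA_mem adj victim hacyc (([(start, victim)].map (pvNeedF adj)).sum) [(start, victim)] [] _ x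
    (by intro t htm; rw [List.mem_singleton] at htm; subst htm; exact hst) (le_refl _) hfuel]
  simp

theorem pv_sorted_congr (l1 l2 : List String) (h : ∀ x, x ∈ l1 ↔ x ∈ l2) :
    PySem.List.sorted (PySem.Set.ofList l1) (fun x => x) false
      = PySem.List.sorted (PySem.Set.ofList l2) (fun x => x) false := by
  apply PySem.List.sorted_eq_sorted_of_perm
  · intro a b hab; exact hab
  · rw [List.perm_ext_iff_of_nodup (PySem.Set.nodup_ofList _) (PySem.Set.nodup_ofList _)]
    intro a
    rw [PySem.Set.mem_ofList, PySem.Set.mem_ofList]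
    exact h a

-- ===== VERDICT (by name: the statement is the Claim_ definition above) =====
theorem leaves_per_branch_spec : Claim_equal_leaves_per_branch := by
  unfold Claim_equal_leaves_per_branch
  intro adj victim _ hpre
  unfold Spec_leaves_per_branch
  obtain ⟨hvic, hall⟩ := hpre
  have hacyc : ∀ s ∈ pvG adj victim, s ∉ pvA adj s := fun s hs => (hall s hs).2
  show leaves_per_branch adj victim = leaves_per_branch_alt adj victim
  simp only [leaves_per_branch, leaves_per_branch_alt]
  rw [PySem.Dict.items_foldl_insert_fresh]
  case hdis => intro a _; exact PySem.Dict.contains_empty ..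
  case hnd => rw [PySem.List.map_fst_enumerate]; exact PySem.List.nodup_pyRange_one ..
  have hempty : (PySem.Dict.empty : PySem.Dict Int (List String)).items = [] := rfl
  rw [hempty, List.nil_append]
  apply List.map_congr_left
  intro p hp
  have hmem : p.2 ∈ PySem.List.sorted (PySem.Set.ofList ((PySem.Dict.ofList adj).getD victim [])) (fun x => x) false := by
    rcases (PySem.List.mem_enumerate_iff _ _ _).1 hp with ⟨k, hk, rfl⟩
    exact List.getElem_mem hk
  have hG : (p.2, victim) ∈ pvG adj victim := by
    apply pv_mem_pvClos_of_mem
    unfold pvInit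
    exact List.mem_map.2 ⟨p.2, (PySem.List.mem_sorted _ _ _ _).1 hmem, rfl⟩
  have hbr := pv_branch adj victim hacyc p.2 hG
  exact congrArg (fun w => (p.1, w)) (pv_sorted_congr _ _ hbr)
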